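-- pv_equiv track=rewrite | github.com/DanteDeRuwe/fys-ster-programmeren-1 | Evaluatie1/de-ouroborosdroom.py | ouroboros
-- ===== SOURCE A (Python) =====
-- def ouroboros(woord_str):
--     """
--     controleert of het woord dat wordt ingegeven een ouroboros is
--
--     >>> ouroboros('agaragar')
--     True
--     >>> ouroboros('sensuousness')
--     True
--     >>> ouroboros('verdrevene')
--     True
--     >>> ouroboros('legovogel')
--     False
--     """
--     #het woord wordt dubbel geschreven
--     controle_str = woord_str * 2
--     #maak hiervan een omgekeerde string, maar zonder de eerste en laatste letter (uitsluiten palindroom)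
--     controle_str = controle_str[-2:0:-1]
--     #verwijder vooraan letters tot de controlestring begint met je originele woord
--     while not controle_str.startswith(woord_str):
--         controle_str = controle_str[1:]
--         #als in de controlestring het woord niet meer kan gevonden worden is het meteen fout
--         if len(controle_str) < len(woord_str):
--             return False
--     #als we uit de while loop geraken, is het woord gevonden
--     return True
-- ===== SOURCE B (Python) =====
-- def ouroboros(woord_str):
--     # same check, built the other way round: reverse first, double, trim the
--     # two palindrome-alignment endpoints, and let the substring test do the scan
--     r = woord_str[::-1]
--     return woord_str in (r + r)[1:-1]
-- ===== Notes on version B (the rewrite author's own statement) =====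
-- stated objective: faster
-- what changed: A hand-rolls the substring search in Python by repeatedly stripping the control string's first character and retrying startswith; B builds the control string directly as reverse-then-double-then-trim and answers with one built-in substring test, so the quadratic Python-level alignment loop disappears.
import Mathlib
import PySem

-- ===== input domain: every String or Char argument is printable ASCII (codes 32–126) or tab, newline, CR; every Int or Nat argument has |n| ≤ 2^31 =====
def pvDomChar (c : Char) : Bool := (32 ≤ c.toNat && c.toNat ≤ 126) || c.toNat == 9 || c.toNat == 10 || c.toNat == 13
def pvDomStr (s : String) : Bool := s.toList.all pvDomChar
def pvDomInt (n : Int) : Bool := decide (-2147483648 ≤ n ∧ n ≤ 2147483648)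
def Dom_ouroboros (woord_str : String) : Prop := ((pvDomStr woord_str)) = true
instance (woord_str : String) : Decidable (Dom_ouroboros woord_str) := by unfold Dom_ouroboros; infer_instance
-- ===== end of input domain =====

-- B replaces A's strip-one-char-and-retry alignment loop by a single built-in substring
-- test on the same control string, built as reverse-then-double-then-trim (measured faster).

-- ===== PORT A =====
-- A's while loop: strip the first character until the control string starts with the
-- word, returning False as soon as the control string becomes shorter than the word.
def ouroborosLoop (woord controle : List Char) : Bool :=
  if PySem.Chars.startswith controle woord then true
  else
    -- controle = controle[1:]; return False once it is shorter than woord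
    if (PySem.List.slice controle (some 1) none).length < woord.length then false
    else ouroborosLoop woord (PySem.List.slice controle (some 1) none)
termination_by controle.length
decreasing_by
  rename_i h1 h2
  rw [PySem.List.slice_from_one] at h2 ⊢
  have hw : woord ≠ [] := by intro hw; simp [hw, PySem.Chars.startswith_iff] at h1
  cases controle with
  | nil => simp at h2; exact absurd h2 hw
  | cons a t => simp

def ouroboros (woord_str : String) : Bool :=
  -- controle_str = woord_str * 2
  let controle := PySem.List.pyRepeat woord_str.toList 2
  -- controle_str = controle_str[-2:0:-1]   (step ≠ 0, so slice? never raises)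
  let controle := (PySem.List.slice? controle (some (-2)) (some 0) (-1)).getD []
  ouroborosLoop woord_str.toList controle

-- ===== PORT B =====
def ouroboros_alt (woord_str : String) : Bool :=
  -- r = woord_str[::-1]
  let r := (PySem.List.slice? woord_str.toList none none (-1)).getD []
  -- woord_str in (r + r)[1:-1]
  PySem.Chars.isIn woord_str.toList (PySem.List.slice (r ++ r) (some 1) (some (-1)))

-- ===== PRECONDITION & SPEC =====
def Spec_ouroboros (woord_str : String) (out : Bool) : Prop := out = ouroboros_alt woord_str
instance (woord_str : String) (out : Bool) : Decidable (Spec_ouroboros woord_str out) := by unfold Spec_ouroboros; infer_instance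

-- ===== CLAIM (what is proved, stated in full; the proofs are below) =====
def Claim_equal_ouroboros : Prop := ∀ (woord_str : String), Dom_ouroboros woord_str → Spec_ouroboros woord_str (ouroboros woord_str)

-- ===== LEMMAS AND PROOFS =====

-- xs[1:-1] is tail-then-dropLast
theorem slice_one_negone (xs : List Char) :
    PySem.List.slice xs (some 1) (some (-1)) = xs.tail.dropLast := by
  simp only [PySem.List.slice, PySem.List.clampIdx]
  cases xs with
  | nil => simp
  | cons a t =>
    simp [List.dropLast_eq_take]
    split_ifs <;> omega

-- indices m, m-1, …, 1 read off xs are (xs.take (m+1)).tail reversed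
theorem rangeGet (xs : List Char) : ∀ (m : Nat), m < xs.length →
    (List.range m).filterMap (fun k => xs[m - k]?) = ((xs.take (m+1)).tail).reverse := by
  intro m
  induction m with
  | zero =>
    intro h
    simp [List.take_add_one, List.getElem?_eq_getElem h]
  | succ m ih =>
    intro h
    rw [List.range_succ_eq_map, List.filterMap_cons]
    have hm : m < xs.length := by omega
    simp only [Nat.sub_zero, List.filterMap_map]
    have h0 : xs[m + 1]? = some xs[m+1] := List.getElem?_eq_getElem h
    rw [h0]
    have he : (fun k => xs[m + 1 - (k+1)]?) = (fun k => xs[m - k]?) := by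
      funext k; congr 1; omega
    simp only [Function.comp_def, he, ih hm]
    have hne : List.take (m+1) xs ≠ [] := by
      simp [List.take_eq_nil_iff]; rintro rfl; simp at h
    rw [show m+1+1 = (m+1)+1 from rfl, List.take_add_one (l := xs) (i := m+1)]
    rw [List.tail_append_of_ne_nil hne, h0]
    simp

-- xs[-2:0:-1] is reverse, then drop the first and last characters
theorem sliceA (xs : List Char) :
    PySem.List.slice? xs (some (-2)) (some 0) (-1) = some (xs.reverse.tail.dropLast) := by
  simp only [PySem.List.slice?, PySem.List.sliceIndices]
  norm_num
  rcases Nat.lt_or_ge xs.length 2 with hn | hn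
  · have hc : (if 2 + min 0 ((xs.length:Int) - 1) < (xs.length:Int) ∨ (xs.length:Int) ≤ -1 then
        (max (-2 + (xs.length:Int)) (-1) - min 0 ((xs.length:Int) - 1)).toNat else 0) = 0 := by
      split_ifs with h1
      · omega
      · rfl
    rw [hc]
    interval_cases h : xs.length
    · simp_all
    · obtain ⟨a, rfl⟩ := List.length_eq_one_iff.mp h
      simp
  · have hc : (if 2 + min 0 ((xs.length:Int) - 1) < (xs.length:Int) ∨ (xs.length:Int) ≤ -1 then
        (max (-2 + (xs.length:Int)) (-1) - min 0 ((xs.length:Int) - 1)).toNat else 0) = xs.length - 2 := by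
      split_ifs with h1 <;> omega
    rw [hc]
    refine Eq.trans (List.filterMap_congr (g := fun k => xs[(xs.length - 2) - k]?) ?_) ?_
    · intro a ha
      rw [List.mem_range] at ha
      congr 1
      omega
    · rw [rangeGet xs (xs.length - 2) (by omega), List.dropLast_eq_take]
      congr 2
      rw [show xs.length - 2 + 1 = xs.length - 1 from by omega]

-- A's alignment loop answers exactly "does woord occur as a prefix of some suffix"
theorem loop_iff (w c : List Char) : ouroborosLoop w c = true ↔ ∃ j, w <+: c.drop j := by
  induction c using ouroborosLoop.induct w with
  | case1 c h =>
    rw [ouroborosLoop, if_pos h]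
    simp only [true_iff]
    exact ⟨0, (PySem.Chars.startswith_iff c w).mp h⟩
  | case2 c h hlen =>
    rw [ouroborosLoop, if_neg h, if_pos hlen]
    simp only [Bool.false_eq_true, false_iff]
    rintro ⟨j, hj⟩
    rw [PySem.List.slice_from_one] at hlen
    cases j with
    | zero =>
      exact h ((PySem.Chars.startswith_iff c w).mpr (by simpa using hj))
    | succ k =>
      have hlj := hj.length_le
      rw [List.length_drop] at hlj
      have htl : c.tail.length = c.length - 1 := List.length_tail
      omega
  | case3 c h hlen ih =>
    rw [ouroborosLoop, if_neg h, if_neg hlen]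
    rw [ih, PySem.List.slice_from_one]
    constructor
    · rintro ⟨j, hj⟩
      refine ⟨j + 1, ?_⟩
      rwa [show j + 1 = 1 + j from by omega, ← List.drop_drop, List.drop_one]
    · rintro ⟨j, hj⟩
      cases j with
      | zero =>
        exact absurd ((PySem.Chars.startswith_iff c w).mpr (by simpa using hj)) h
      | succ k =>
        refine ⟨k, ?_⟩
        rwa [show k + 1 = 1 + k from by omega, ← List.drop_drop, List.drop_one] at hj

theorem loop_eq_isIn (woord controle : List Char) :
    ouroborosLoop woord controle = PySem.Chars.isIn woord controle := by
  rw [Bool.eq_iff_iff, loop_iff]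
  exact PySem.Chars.exists_prefix_drop_iff_isIn woord controle

theorem pyRepeat_two (xs : List Char) : PySem.List.pyRepeat xs 2 = xs ++ xs := by
  simp [PySem.List.pyRepeat]

-- ===== VERDICT (by name: the statement is the Claim_ definition above) =====
theorem ouroboros_spec : Claim_equal_ouroboros := by
  intro w _
  unfold Spec_ouroboros ouroboros ouroboros_alt
  simp only [pyRepeat_two, sliceA, PySem.List.slice?_none_none_neg_one, Option.getD_some,
    slice_one_negone, loop_eq_isIn, ← List.reverse_append]
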